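-- pv_equiv track=rewrite | github.com/opengauss-mirror/openGauss-server | src/gausskernel/dbmind/tools/xtuner/tuner/main.py | check_path_valid
-- ===== SOURCE A (Python) =====
-- def check_path_valid(obtainpath):
--     """
--     function: check path valid
--     input : envValue
--     output: NA
--     """
--     PATH_CHECK_LIST = [" ", "|", ";", "&", "$", "<", ">", "`", "\\", "'", "\"", "{", "}", "(", ")", "[", "]", "~", "*",
--                        "?", "!", "\n"]
--     if obtainpath.strip() == "":
--         return
--     for rac in PATH_CHECK_LIST:
--         flag = obtainpath.find(rac)
--         if flag >= 0:
--             return False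
--     return True
-- ===== SOURCE B (Python) =====
-- FORBIDDEN_PATH_CHARS = set(" |;&$<>`\\'\"{}()[]~*?!\n")
--
--
-- def check_path_valid(obtainpath):
--     if obtainpath.strip() == "":
--         return
--     return not any(c in FORBIDDEN_PATH_CHARS for c in obtainpath)
-- ===== Notes on version B (the rewrite author's own statement) =====
-- stated objective: idiomatic
-- what changed: B makes a single pass over the path's characters testing set membership (not any(c in FORBIDDEN for c in path)), instead of A's loop over the 22 forbidden characters that rescans the whole path with .find for each one.
import Mathlib
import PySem

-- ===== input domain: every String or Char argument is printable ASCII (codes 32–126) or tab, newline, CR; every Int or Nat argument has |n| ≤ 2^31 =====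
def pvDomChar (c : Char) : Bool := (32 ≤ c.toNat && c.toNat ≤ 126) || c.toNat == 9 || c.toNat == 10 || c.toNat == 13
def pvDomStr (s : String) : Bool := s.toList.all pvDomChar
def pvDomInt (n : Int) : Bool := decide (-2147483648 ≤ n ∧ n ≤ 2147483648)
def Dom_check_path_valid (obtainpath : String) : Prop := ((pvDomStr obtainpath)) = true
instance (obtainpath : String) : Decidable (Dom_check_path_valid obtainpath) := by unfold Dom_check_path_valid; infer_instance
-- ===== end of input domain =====

-- B replaces A's per-forbidden-character rescans of the path (str.find) by one pass over the
-- path's characters with a set-membership test; more idiomatic, same return values.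

-- ===== PORT A =====
def PATH_CHECK_LIST : List String :=
  [" ", "|", ";", "&", "$", "<", ">", "`", "\\", "'", "\"", "{", "}", "(", ")", "[", "]", "~", "*",
   "?", "!", "\n"]

-- the `for rac in PATH_CHECK_LIST` loop with its early `return False`
def checkPathLoop (obtainpath : String) : List String → Option Bool
  | [] => some true
  | rac :: rest =>
      let flag := PySem.Str.find obtainpath rac
      if flag ≥ 0 then some false else checkPathLoop obtainpath rest

def check_path_valid (obtainpath : String) : Option Bool :=
  if PySem.Str.strip obtainpath = "" then none
  else checkPathLoop obtainpath PATH_CHECK_LIST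

-- ===== PORT B =====
def FORBIDDEN_PATH_CHARS : PySem.Set Char :=
  PySem.Set.ofList " |;&$<>`\\'\"{}()[]~*?!\n".toList

def check_path_valid_alt (obtainpath : String) : Option Bool :=
  if PySem.Str.strip obtainpath = "" then none
  else some (!(obtainpath.toList.any (fun c => PySem.Set.contains FORBIDDEN_PATH_CHARS c)))

-- ===== PRECONDITION & SPEC =====
def Spec_check_path_valid (obtainpath : String) (out : Option Bool) : Prop := out = check_path_valid_alt obtainpath
instance (obtainpath : String) (out : Option Bool) : Decidable (Spec_check_path_valid obtainpath out) := by unfold Spec_check_path_valid; infer_instance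

-- ===== CLAIM (what is proved, stated in full; the proofs are below) =====
def Claim_equal_check_path_valid : Prop := ∀ (obtainpath : String), Dom_check_path_valid obtainpath → Spec_check_path_valid obtainpath (check_path_valid obtainpath)

-- ===== LEMMAS AND PROOFS =====

-- the forbidden characters, as characters
def forbChars : List Char := " |;&$<>`\\'\"{}()[]~*?!\n".toList

-- a single [c] is an infix of l exactly when c is an element of l
theorem singleton_infix_iff {α : Type} (c : α) (l : List α) : [c] <:+: l ↔ c ∈ l := by
  constructor
  · intro h
    exact h.subset (List.mem_singleton_self c)
  · intro h
    obtain ⟨s, t, rfl⟩ := List.append_of_mem h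
    exact ⟨s, t, by simp⟩

-- A's PATH_CHECK_LIST is exactly the forbidden characters, each as a one-character string
theorem path_check_list_eq : PATH_CHECK_LIST = forbChars.map (fun c => String.ofList [c]) := by
  decide

-- A's loop returns `some (not (any forbidden string occurs))`
theorem checkPathLoop_eq (s : String) (L : List String) :
    checkPathLoop s L = some (!(L.any (fun rac => decide (0 ≤ PySem.Str.find s rac)))) := by
  induction L with
  | nil => rfl
  | cons rac rest ih =>
      simp only [checkPathLoop, List.any_cons, ge_iff_le]
      by_cases h : 0 ≤ PySem.Chars.find s.toList rac.toList
      · simp [h]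
      · simp [h, ih]

-- swapping the iteration: any over the forbidden list = any over the path's characters
theorem any_swap (l F : List Char) :
    (F.any (fun r => decide (r ∈ l))) = (l.any (fun c => decide (c ∈ F))) := by
  rw [Bool.eq_iff_iff]
  simp only [List.any_eq_true, decide_eq_true_eq]
  constructor
  · rintro ⟨r, hF, hl⟩; exact ⟨r, hl, hF⟩
  · rintro ⟨c, hl, hF⟩; exact ⟨c, hF, hl⟩

-- ===== VERDICT (by name: the statement is the Claim_ definition above) =====
theorem check_path_valid_spec : Claim_equal_check_path_valid := by
  intro s _
  unfold Spec_check_path_valid check_path_valid check_path_valid_alt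
  by_cases hstrip : PySem.Str.strip s = ""
  · simp [hstrip]
  · simp only [hstrip, if_false]
    rw [checkPathLoop_eq]
    congr 1
    rw [path_check_list_eq, List.any_map]
    have hA : forbChars.any ((fun rac => decide (0 ≤ PySem.Str.find s rac)) ∘ fun c => String.ofList [c])
        = forbChars.any (fun r => decide (r ∈ s.toList)) := by
      apply PySem.List.any_congr_mem
      intro c _
      simp only [Function.comp]
      rw [decide_eq_decide, PySem.Str.find_nonneg_iff]
      have : (String.ofList [c]).toList = [c] := by simp
      rw [this]
      exact singleton_infix_iff c s.toList
    rw [hA, any_swap]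
    congr 1
    apply PySem.List.any_congr_mem
    intro c _
    have hforb : FORBIDDEN_PATH_CHARS = forbChars := by decide
    simp [PySem.Set.contains, hforb, forbChars]
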